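-- pv_equiv track=rewrite | github.com/afortunado-aceptado/Rudra | main/post_analyze/evaluate.py | gauge_localizer
-- ===== SOURCE A (Python) =====
-- def minDistance(a, b):
--     if abs(len(a) - len(b)) >= 1: return 100
--     dp = [[0 for _ in range(len(b) + 1)] for j in range(len(a) + 1)]
--     for i in range(len(a) + 1):
--         dp[i][0] = i
--     for j in range(len(b) + 1):
--         dp[0][j] = j
--     for i in range(1, len(a) + 1):
--         for j in range(1, len(b) + 1):
--             if a[i - 1] == b[j - 1]:
--                 dp[i][j] = dp[i - 1][j - 1]
--             else:
--                 dp[i][j] = min(dp[i - 1][j] + 1, dp[i][j - 1] + 1, dp[i - 1][j - 1] + 1)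
--     return dp[-1][-1]
--
-- def gauge_localizer(ans, res) -> tuple: #TP, FP, FN, Jaccard coefficient, Hit@5
--     if len(ans) == 0:
--         return 1, 0, 0
--     label = [False] * len(ans)
--
--     tp, fp = 0, 0
--     for l in res:
--         flag = 0
--         for i, gt in enumerate(ans):
--             if label[i]: continue
--             l, gt = l.replace(" ", "").strip(), gt.replace(" ", "").strip()
--             if l == gt or (minDistance(l, gt) <= 1):
--                 tp += 1; flag = 1;
--                 label[i] = True
--                 break
--         fp += (flag == 0)
--
--     fn = max(0, min(5, sum([len(gt) > 3 for gt in ans])) - sum(label))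
--     #Jc = sum(label) / (fn + len(res)) # (A*B) / (A|B)
--     return tp, fp, fn
-- ===== SOURCE B (Python) =====
-- def gauge_localizer(ans, res) -> tuple:  # TP, FP, FN
--     if not ans:
--         return 1, 0, 0
--
--     def norm(s):
--         return s.replace(" ", "").strip()
--
--     def close(p, g):  # edit distance <= 1 for equal lengths == at most one mismatching position
--         return len(p) == len(g) and sum(c != d for c, d in zip(p, g)) <= 1
--
--     gts = [norm(g) for g in ans]
--     matched = [False] * len(ans)
--     tp = 0
--     for raw in res:
--         p = norm(raw)
--         for i, g in enumerate(gts):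
--             if not matched[i] and close(p, g):
--                 matched[i] = True
--                 tp += 1
--                 break
--     fp = len(res) - tp
--     fn = max(0, min(5, sum(len(g) > 3 for g in ans)) - tp)
--     return tp, fp, fn
-- ===== Notes on version B (the rewrite author's own statement) =====
-- stated objective: faster
-- what changed: Replaced the O(L^2) edit-distance DP (which only ever matters for equal-length strings, where distance<=1 means at most one mismatching position) by a single O(L) zip mismatch count, hoisted the replace/strip normalisation out of the nested loop so each string is normalised once, and derived fp and fn arithmetically from tp instead of a separate fp accumulator and a label-sum.
import Mathlib
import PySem

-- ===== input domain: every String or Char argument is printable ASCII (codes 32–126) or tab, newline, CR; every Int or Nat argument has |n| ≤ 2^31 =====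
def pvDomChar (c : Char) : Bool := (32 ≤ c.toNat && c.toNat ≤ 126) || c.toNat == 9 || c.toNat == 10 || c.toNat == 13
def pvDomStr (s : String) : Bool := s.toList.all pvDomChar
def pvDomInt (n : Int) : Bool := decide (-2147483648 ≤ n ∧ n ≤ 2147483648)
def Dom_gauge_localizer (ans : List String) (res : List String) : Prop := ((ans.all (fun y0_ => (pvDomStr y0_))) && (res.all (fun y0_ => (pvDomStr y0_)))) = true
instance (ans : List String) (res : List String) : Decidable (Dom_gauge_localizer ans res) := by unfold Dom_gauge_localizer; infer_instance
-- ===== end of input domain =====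

-- B replaces the per-pair O(L^2) edit-distance DP by an O(L) mismatch count (exact because the DP
-- is only consulted for equal-length strings), normalises every string once instead of inside the
-- nested loop, and derives fp and fn arithmetically from tp. Return-value equivalence only.

-- ===== PORT A =====
-- inner j-loop of the DP, one row at a time (dp[i][j] reads only row i-1 and dp[i][j-1],
-- so the in-place table of the Python is row_(i-1) = prev, dp[i][j-1] = left, filled left to right)
def pvRowGo (c : Char) (prev : List Int) (left : Int) : List Char → List Int
  | [] => []
  | d :: bs =>
      let diag := prev.headD 0
      let up := prev.tail.headD 0
      let v := if c == d then diag else min (min (up + 1) (left + 1)) (diag + 1)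
      v :: pvRowGo c prev.tail v bs

def minDistance (a : String) (b : String) : Int :=
  if ((PySem.Str.len a : Int) - (PySem.Str.len b : Int)).natAbs ≥ 1 then 100
  else
    let bl := b.toList
    -- dp[0][j] = j
    let row0 : List Int := (List.range (bl.length + 1)).map (fun (j : Nat) => (j : Int))
    -- for i in 1..len(a): dp[i][0] = i, then the j-loop
    let fin := a.toList.foldl (fun (st : List Int × Int) c =>
        let i := st.2 + 1
        (i :: pvRowGo c st.1 i bl, i)) (row0, 0)
    (fin.1).getLastD 0   -- dp[-1][-1]; the row is never empty

def pvNormA (s : String) : String := PySem.Str.strip (PySem.Str.replace s " " "")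

-- inner loop over enumerate(ans): skip labelled entries, re-normalise l at each visited one,
-- label and break at the first match; returns (label, flag)
def pvScanA (l : String) : List String → List Bool → List Bool × Bool
  | [], label => (label, false)
  | _ :: _, [] => ([], false)
  | gt :: rest, lb :: lbs =>
    if lb then
      let r := pvScanA l rest lbs
      (lb :: r.1, r.2)
    else
      let l' := pvNormA l
      let gt' := pvNormA gt
      if l' == gt' || decide (minDistance l' gt' ≤ 1) then
        (true :: lbs, true)
      else
        let r := pvScanA l' rest lbs
        (lb :: r.1, r.2)

-- body of the outer 'for l in res' loop; state (label, tp, fp)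
def pvStepA (ans : List String) (st : List Bool × Int × Int) (l : String) : List Bool × Int × Int :=
  let r := pvScanA l ans st.1
  (r.1, st.2.1 + (if r.2 then 1 else 0), st.2.2 + (if r.2 then 0 else 1))

def gauge_localizer (ans : List String) (res : List String) : List Int :=
  if ans.length == 0 then [1, 0, 0]
  else
    let st := res.foldl (pvStepA ans) (List.replicate ans.length false, 0, 0)
    let fn := max 0 (min 5 ((ans.map (fun gt => if 3 < (PySem.Str.len gt : Int) then (1 : Int) else 0)).sum)
                      - ((st.1.map (fun b => if b then (1 : Int) else 0)).sum))
    [st.2.1, st.2.2, fn]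

-- ===== PORT B =====
def pvNormB (s : String) : String := PySem.Str.strip (PySem.Str.replace s " " "")

-- len(p) == len(g) and sum(c != d for c, d in zip(p, g)) <= 1
def pvClose (p : String) (g : String) : Bool :=
  (p.toList.length == g.toList.length) &&
    decide ((p.toList.zip g.toList).countP (fun q => !(q.1 == q.2)) ≤ 1)

-- first unmatched index i with close(p, gts[i]); returns (matched, found)
def pvScanB (p : String) : List String → List Bool → List Bool × Bool
  | [], matched => (matched, false)
  | _ :: _, [] => ([], false)
  | g :: rest, m :: ms =>
    if !m && pvClose p g then (true :: ms, true)
    else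
      let r := pvScanB p rest ms
      (m :: r.1, r.2)

-- body of B's loop over res; state (matched, tp)
def pvStepB (gts : List String) (st : List Bool × Int) (raw : String) : List Bool × Int :=
  let r := pvScanB (pvNormB raw) gts st.1
  (r.1, st.2 + (if r.2 then 1 else 0))

def gauge_localizer_alt (ans : List String) (res : List String) : List Int :=
  match ans with
  | [] => [1, 0, 0]
  | _ :: _ =>
    let gts := ans.map pvNormB
    let st := res.foldl (pvStepB gts) (List.replicate ans.length false, 0)
    let tp := st.2
    let fp := (res.length : Int) - tp
    let fn := max 0 (min 5 ((ans.map (fun g => if 3 < (PySem.Str.len g : Int) then (1 : Int) else 0)).sum) - tp)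
    [tp, fp, fn]

-- ===== PRECONDITION & SPEC =====
def Spec_gauge_localizer (ans : List String) (res : List String) (out : List Int) : Prop := out = gauge_localizer_alt ans res
instance (ans : List String) (res : List String) (out : List Int) : Decidable (Spec_gauge_localizer ans res out) := by unfold Spec_gauge_localizer; infer_instance

-- ===== CLAIM (what is proved, stated in full; the proofs are below) =====
def Claim_equal_gauge_localizer : Prop := ∀ (ans : List String) (res : List String), Dom_gauge_localizer ans res → Spec_gauge_localizer ans res (gauge_localizer ans res)

-- ===== LEMMAS AND PROOFS =====

-- Levenshtein distance, the recursion the DP table tabulates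
def pvLev : List Char → List Char → Nat
  | [], v => v.length
  | c :: u, [] => (c :: u).length
  | c :: u, d :: v =>
      if c == d then pvLev u v
      else 1 + min (min (pvLev (c :: u) v) (pvLev u (d :: v))) (pvLev u v)
termination_by u v => u.length + v.length

def pvMis (u v : List Char) : Nat := (u.zip v).countP (fun q => !(q.1 == q.2))

theorem pvLev_nil_right (u : List Char) : pvLev u [] = u.length := by
  cases u <;> simp [pvLev]

theorem pvLev_eq_zero (u v : List Char) : pvLev u v = 0 ↔ u = v := by
  induction u generalizing v with
  | nil => cases v <;> simp [pvLev]
  | cons c u ih =>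
    cases v with
    | nil => simp [pvLev]
    | cons d v =>
      rw [pvLev]
      by_cases h : c = d
      · simp [h, ih]
      · simp only [h, if_false, beq_iff_eq]
        constructor
        · intro h0; omega
        · intro h0; exact absurd (List.cons.injEq .. ▸ h0).1 h

theorem pvMis_cons (c d : Char) (u v : List Char) :
    pvMis (c :: u) (d :: v) = (if c = d then 0 else 1) + pvMis u v := by
  simp [pvMis, List.countP_cons]
  split_ifs with h <;> omega

theorem pvMis_eq_zero (u v : List Char) (h : u.length = v.length) :
    pvMis u v = 0 ↔ u = v := by
  induction u generalizing v with
  | nil => cases v <;> simp_all [pvMis]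
  | cons c u ih =>
    cases v with
    | nil => simp at h
    | cons d v =>
      simp only [List.length_cons, Nat.add_right_cancel_iff] at h
      rw [pvMis_cons]
      by_cases hc : c = d
      · simp [hc, ih v h]
      · simp [hc]

theorem pvLev_le_one_iff (u v : List Char) (h : u.length = v.length) :
    (pvLev u v ≤ 1 ↔ pvMis u v ≤ 1) := by
  induction u generalizing v with
  | nil =>
    cases v with
    | nil => simp [pvLev, pvMis]
    | cons d v => simp at h
  | cons c u ih =>
    cases v with
    | nil => simp at h
    | cons d v =>
      simp only [List.length_cons, Nat.add_right_cancel_iff] at h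
      rw [pvLev, pvMis_cons]
      by_cases hc : c = d
      · simpa [hc] using ih v h
      · have h1 : pvLev (c :: u) v ≠ 0 := by
          intro h0
          have := (pvLev_eq_zero _ _).mp h0
          apply_fun List.length at this
          simp at this; omega
        have h2 : pvLev u (d :: v) ≠ 0 := by
          intro h0
          have := (pvLev_eq_zero _ _).mp h0
          apply_fun List.length at this
          simp at this; omega
        have h3 : pvLev u v = 0 ↔ pvMis u v = 0 := by
          rw [pvLev_eq_zero, pvMis_eq_zero u v h]
        simp only [hc, if_false, beq_iff_eq]
        omega

theorem pvMis_reverse (u v : List Char) (h : u.length = v.length) :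
    pvMis u.reverse v.reverse = pvMis u v := by
  induction u generalizing v with
  | nil => cases v <;> simp_all [pvMis]
  | cons c u ih =>
    cases v with
    | nil => simp at h
    | cons d v =>
      simp only [List.length_cons, Nat.add_right_cancel_iff] at h
      simp only [List.reverse_cons]
      rw [pvMis_cons, ← ih v h]
      unfold pvMis
      rw [List.zip_append (by simpa using h), List.countP_append]
      simp [List.countP_cons]
      split_ifs with hc <;> omega

def pvRowSpec (r : List Char) : List Char → List Char → List Int
  | s, [] => [(pvLev r s : Int)]
  | s, d :: bs => (pvLev r s : Int) :: pvRowSpec r (d :: s) bs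

theorem pvRowSpec_head (r s bl : List Char) :
    pvRowSpec r s bl = (pvLev r s : Int) :: (pvRowSpec r s bl).tail := by
  cases bl <;> simp [pvRowSpec]

theorem pvLev_cons_cons (c d : Char) (u v : List Char) :
    (pvLev (c :: u) (d :: v) : Int) =
      if c = d then (pvLev u v : Int)
      else min (min ((pvLev u (d :: v) : Int) + 1) ((pvLev (c :: u) v : Int) + 1)) ((pvLev u v : Int) + 1) := by
  rw [pvLev]
  by_cases h : c = d
  · simp [h]
  · simp only [beq_iff_eq, h, if_false]
    push_cast [Nat.cast_min]
    omega

theorem pvRowGo_spec (c : Char) : ∀ (bl s r : List Char),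
    pvRowGo c (pvRowSpec r s bl) (pvLev (c :: r) s : Int) bl = (pvRowSpec (c :: r) s bl).tail := by
  intro bl
  induction bl with
  | nil => intro s r; simp [pvRowGo, pvRowSpec]
  | cons d bs ih =>
    intro s r
    rw [pvRowSpec, pvRowGo]
    have hup : ((pvRowSpec r (d :: s) bs).headD 0) = (pvLev r (d :: s) : Int) := by
      cases bs <;> simp [pvRowSpec]
    simp only [List.headD_cons, List.tail_cons, hup]
    have hv : (if c == d then (pvLev r s : Int)
        else min (min ((pvLev r (d :: s) : Int) + 1) ((pvLev (c :: r) s : Int) + 1)) ((pvLev r s : Int) + 1))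
        = (pvLev (c :: r) (d :: s) : Int) := by
      rw [pvLev_cons_cons]; simp
    rw [hv, ih (d :: s) r]
    conv_rhs => rw [pvRowSpec]
    simp only [List.tail_cons]
    exact (pvRowSpec_head (c :: r) (d :: s) bs).symm

theorem pvRowSpec_nil_left : ∀ (bl s : List Char),
    pvRowSpec [] s bl = (List.range (bl.length + 1)).map (fun j => ((s.length + j : Nat) : Int)) := by
  intro bl
  induction bl with
  | nil => intro s; simp [pvRowSpec, pvLev]
  | cons d bs ih =>
    intro s
    rw [pvRowSpec, ih (d :: s)]
    conv_rhs => rw [show (d :: bs).length + 1 = (bs.length + 1) + 1 by simp, List.range_succ_eq_map,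
      List.map_cons, List.map_map]
    refine congrArg₂ List.cons (by simp [pvLev]) ?_
    apply List.map_congr_left
    intro j _
    simp only [Function.comp_apply, List.length_cons]
    congr 1
    omega

theorem pvRowSpec_getLastD (r : List Char) : ∀ (bl s : List Char) (d0 : Int),
    (pvRowSpec r s bl).getLastD d0 = (pvLev r (bl.reverse ++ s) : Int) := by
  intro bl
  induction bl with
  | nil => intro s d0; simp [pvRowSpec]
  | cons d bs ih =>
    intro s d0
    rw [pvRowSpec, List.getLastD_cons, ih (d :: s)]
    simp

theorem pvFold_rows (bl : List Char) : ∀ (rest rrev : List Char),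
    rest.foldl (fun (st : List Int × Int) c =>
        let i := st.2 + 1
        (i :: pvRowGo c st.1 i bl, i)) (pvRowSpec rrev [] bl, (rrev.length : Int))
      = (pvRowSpec (rest.reverse ++ rrev) [] bl, ((rest.length + rrev.length : Nat) : Int)) := by
  intro rest
  induction rest with
  | nil => intro rrev; simp
  | cons c cs ih =>
    intro rrev
    simp only [List.foldl_cons]
    have hi : (rrev.length : Int) + 1 = ((c :: rrev).length : Int) := by simp
    have hrow : (rrev.length : Int) + 1 = (pvLev (c :: rrev) [] : Int) := by
      rw [pvLev_nil_right]; simp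
    have : ((rrev.length : Int) + 1) :: pvRowGo c (pvRowSpec rrev [] bl) ((rrev.length : Int) + 1) bl
        = pvRowSpec (c :: rrev) [] bl := by
      rw [hrow, pvRowGo_spec]
      exact (pvRowSpec_head (c :: rrev) [] bl).symm
    rw [this, hi, ih (c :: rrev)]
    have hl3 : cs.reverse ++ (c :: rrev) = (c :: cs).reverse ++ rrev := by simp
    rw [hl3]
    congr 1
    simp only [List.length_cons]
    push_cast
    omega

theorem minDistance_spec (a b : String) :
    minDistance a b =
      if a.toList.length = b.toList.length then (pvLev a.toList.reverse b.toList.reverse : Int)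
      else 100 := by
  unfold minDistance
  by_cases hl : a.toList.length = b.toList.length
  · have hguard : ¬ (((PySem.Str.len a : Int) - (PySem.Str.len b : Int)).natAbs ≥ 1) := by
      simp [PySem.Str.len_eq, hl]
    rw [if_neg hguard, if_pos hl]
    have hrow0 : (List.range (b.toList.length + 1)).map (fun (j : Nat) => (j : Int))
        = pvRowSpec [] [] b.toList := by
      rw [pvRowSpec_nil_left]
      apply List.map_congr_left
      intro j _
      simp
    simp only [hrow0]
    have h0 : (0 : Int) = (([] : List Char).length : Int) := by simp
    rw [h0, pvFold_rows b.toList a.toList [], pvRowSpec_getLastD]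
    simp
  · have hguard : (((PySem.Str.len a : Int) - (PySem.Str.len b : Int)).natAbs ≥ 1) := by
      simp only [PySem.Str.len_eq]
      omega
    rw [if_pos hguard, if_neg hl]

theorem pvPred_eq (p g : String) :
    (p == g || decide (minDistance p g ≤ 1)) = pvClose p g := by
  have hdef : pvClose p g
      = ((p.toList.length == g.toList.length) && decide (pvMis p.toList g.toList ≤ 1)) := rfl
  have key : ((p == g || decide (minDistance p g ≤ 1)) = true) ↔ (pvClose p g = true) := by
    rw [hdef]
    simp only [Bool.or_eq_true, beq_iff_eq, decide_eq_true_eq, Bool.and_eq_true,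
      minDistance_spec]
    by_cases hl : p.toList.length = g.toList.length
    · rw [if_pos hl]
      have hrev : p.toList.reverse.length = g.toList.reverse.length := by simpa using hl
      have hcast : ((pvLev p.toList.reverse g.toList.reverse : Nat) : Int) ≤ 1
          ↔ pvLev p.toList.reverse g.toList.reverse ≤ 1 := by exact_mod_cast Iff.rfl
      have hmis : pvLev p.toList.reverse g.toList.reverse ≤ 1 ↔ pvMis p.toList g.toList ≤ 1 := by
        rw [pvLev_le_one_iff _ _ hrev, pvMis_reverse _ _ hl]
      constructor
      · rintro (h | h)
        · subst h
          exact ⟨rfl, by rw [(pvMis_eq_zero p.toList p.toList rfl).mpr rfl]; omega⟩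
        · exact ⟨hl, hmis.mp (hcast.mp h)⟩
      · rintro ⟨-, h⟩
        exact Or.inr (hcast.mpr (hmis.mpr h))
    · rw [if_neg hl]
      constructor
      · rintro (h | h)
        · subst h; exact absurd rfl hl
        · omega
      · rintro ⟨h, -⟩
        exact absurd h hl
  exact Bool.coe_iff_coe.mp key

theorem replace_go_space : ∀ (l : List Char) (fuel : Nat) (acc : List Char), l.length ≤ fuel →
    PySem.Chars.replace.go [' '] [] fuel l acc = acc.reverse ++ l.filter (fun c => !(c == ' ')) := by
  intro l
  induction l with
  | nil => intro fuel acc _; cases fuel <;> simp [PySem.Chars.replace.go]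
  | cons c t ih =>
    intro fuel acc h
    cases fuel with
    | zero => simp at h
    | succ f =>
      by_cases hc : c = ' '
      · subst hc
        rw [show PySem.Chars.replace.go [' '] [] (f + 1) (' ' :: t) acc
            = PySem.Chars.replace.go [' '] [] f t acc from by
          simp [PySem.Chars.replace.go, List.isPrefixOf]]
        rw [ih f acc (by simpa using h)]
        simp
      · have hbc : (' ' == c) = false := by
          rw [beq_eq_false_iff_ne]
          exact fun h => hc h.symm
        have hpre : (([' '] : List Char).isPrefixOf (c :: t)) = false := by
          simp [List.isPrefixOf, hbc]
        rw [show PySem.Chars.replace.go [' '] [] (f + 1) (c :: t) acc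
            = PySem.Chars.replace.go [' '] [] f t (c :: acc) from by
          simp [PySem.Chars.replace.go, hpre]]
        rw [ih f (c :: acc) (by simpa using h)]
        simp [hc]

theorem replace_space (t : List Char) :
    PySem.Chars.replace t [' '] [] = t.filter (fun c => !(c == ' ')) := by
  rw [PySem.Chars.replace]
  simpa using replace_go_space t t.length [] le_rfl

theorem strip_as_rdropWhile (t : List Char) :
    PySem.Chars.strip t = List.rdropWhile PySem.Chars.isspace (List.dropWhile PySem.Chars.isspace t) := by
  simp [PySem.Chars.strip, PySem.Chars.rstrip, PySem.Chars.lstrip, List.rdropWhile]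

theorem strip_subset (t : List Char) (c : Char) (h : c ∈ PySem.Chars.strip t) : c ∈ t := by
  rw [strip_as_rdropWhile] at h
  have h1 := List.rdropWhile_prefix (p := PySem.Chars.isspace)
    (List.dropWhile PySem.Chars.isspace t)
  have h2 := List.dropWhile_suffix (l := t) PySem.Chars.isspace
  exact h2.sublist.subset (h1.sublist.subset h)

theorem strip_idem (t : List Char) :
    PySem.Chars.strip (PySem.Chars.strip t) = PySem.Chars.strip t := by
  rw [strip_as_rdropWhile t, strip_as_rdropWhile]
  have hdrop : List.dropWhile PySem.Chars.isspace
      (List.rdropWhile PySem.Chars.isspace (List.dropWhile PySem.Chars.isspace t))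
      = List.rdropWhile PySem.Chars.isspace (List.dropWhile PySem.Chars.isspace t) := by
    obtain ⟨w, hw⟩ := List.rdropWhile_prefix (p := PySem.Chars.isspace)
      (l := List.dropWhile PySem.Chars.isspace t)
    cases hv : List.rdropWhile PySem.Chars.isspace (List.dropWhile PySem.Chars.isspace t) with
    | nil => simp
    | cons a v =>
      rw [hv] at hw
      have hthis : List.dropWhile PySem.Chars.isspace t = a :: (v ++ w) := by
        rw [← hw]; simp
      have hne : List.dropWhile PySem.Chars.isspace t ≠ [] := by simp [hthis]
      have hnot := List.head_dropWhile_not PySem.Chars.isspace hne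
      have hha : PySem.Chars.isspace a = false := by
        have hhead : (List.dropWhile PySem.Chars.isspace t).head hne = a := by
          simp [hthis]
        rw [hhead] at hnot
        simpa using hnot
      rw [List.dropWhile_cons]
      simp [hha]
  rw [hdrop, List.rdropWhile_idempotent]

theorem pvNormA_ofList (x : String) :
    pvNormA x = String.ofList (PySem.Chars.strip (x.toList.filter (fun c => !(c == ' ')))) := by
  show PySem.Str.strip (PySem.Str.replace x " " "") = _
  unfold PySem.Str.strip
  refine congrArg String.ofList ?_
  rw [show (PySem.Str.replace x " " "").toList
      = PySem.Chars.replace x.toList [' '] [] from by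
    simp [PySem.Str.replace, String.toList_ofList]]
  rw [replace_space]

theorem pvNorm_idem (s : String) : pvNormA (pvNormA s) = pvNormA s := by
  rw [pvNormA_ofList s, pvNormA_ofList]
  refine congrArg String.ofList ?_
  rw [String.toList_ofList]
  have hnosp : ∀ c ∈ PySem.Chars.strip (s.toList.filter (fun c => !(c == ' '))),
      (!(c == ' ')) = true := by
    intro c hc
    have := strip_subset _ c hc
    simp only [List.mem_filter] at this
    exact this.2
  rw [List.filter_eq_self.mpr hnosp, strip_idem]


theorem pvScan_eq : ∀ (ansL : List String) (label : List Bool) (l : String),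
    pvScanA l ansL label = pvScanB (pvNormA l) (ansL.map pvNormB) label := by
  intro ansL
  induction ansL with
  | nil => intro label l; simp [pvScanA, pvScanB]
  | cons gt rest ih =>
    intro label l
    cases label with
    | nil => simp [pvScanA, pvScanB]
    | cons lb lbs =>
      rw [List.map_cons, pvScanA, pvScanB]
      by_cases hlb : lb
      · subst hlb
        rw [if_pos rfl, if_neg (by simp : ¬((!true && pvClose (pvNormA l) (pvNormB gt)) = true)),
          ih lbs l]
      · have hlb' : lb = false := by simpa using hlb
        subst hlb'
        rw [if_neg (by simp : ¬((false : Bool) = true))]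
        rw [show ((!false && pvClose (pvNormA l) (pvNormB gt))) = pvClose (pvNormA l) (pvNormB gt) from by simp]
        rw [show pvNormB gt = pvNormA gt from rfl, ← pvPred_eq (pvNormA l) (pvNormA gt)]
        by_cases hm : (pvNormA l == pvNormA gt || decide (minDistance (pvNormA l) (pvNormA gt) ≤ 1)) = true
        · rw [if_pos hm, if_pos hm]
        · rw [if_neg hm, if_neg hm]
          rw [ih lbs (pvNormA l), pvNorm_idem]

def pvSumI (label : List Bool) : Int := (label.map (fun b => if b then (1 : Int) else 0)).sum

theorem pvSumI_cons (b : Bool) (l : List Bool) :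
    pvSumI (b :: l) = (if b then 1 else 0) + pvSumI l := by
  simp [pvSumI]

theorem pvScanB_sum (p : String) : ∀ (gts : List String) (label : List Bool),
    pvSumI (pvScanB p gts label).1 = pvSumI label + (if (pvScanB p gts label).2 then 1 else 0) := by
  intro gts
  induction gts with
  | nil => intro label; simp [pvScanB]
  | cons g rest ih =>
    intro label
    cases label with
    | nil => simp [pvScanB, pvSumI]
    | cons m ms =>
      rw [pvScanB]
      by_cases hc : (!m && pvClose p g) = true
      · have hm : m = false := by
          cases m
          · rfl
          · simp at hc
        subst hm
        rw [if_pos hc]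
        simp only [pvSumI_cons]
        simp
        omega
      · rw [if_neg hc]
        simp only [pvSumI_cons, ih ms]
        split_ifs <;> omega

theorem pvSumI_replicate (n : Nat) : pvSumI (List.replicate n false) = 0 := by
  simp [pvSumI]

theorem gauge_fold (ans : List String) : ∀ (resL : List String) (label : List Bool) (tp fp : Int),
    (resL.foldl (pvStepA ans) (label, tp, fp))
      = ((resL.foldl (pvStepB (ans.map pvNormB)) (label, tp)).1,
         (resL.foldl (pvStepB (ans.map pvNormB)) (label, tp)).2,
         fp + (resL.length : Int) - ((resL.foldl (pvStepB (ans.map pvNormB)) (label, tp)).2 - tp))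
    ∧ pvSumI ((resL.foldl (pvStepB (ans.map pvNormB)) (label, tp)).1)
        = pvSumI label + ((resL.foldl (pvStepB (ans.map pvNormB)) (label, tp)).2 - tp) := by
  intro resL
  induction resL with
  | nil => intro label tp fp; constructor <;> simp
  | cons l rest ih =>
    intro label tp fp
    simp only [List.foldl_cons, List.length_cons]
    have hA : pvStepA ans (label, tp, fp) l
        = ((pvScanB (pvNormA l) (ans.map pvNormB) label).1,
           tp + (if (pvScanB (pvNormA l) (ans.map pvNormB) label).2 then 1 else 0),
           fp + (if (pvScanB (pvNormA l) (ans.map pvNormB) label).2 then 0 else 1)) := by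
      simp only [pvStepA, pvScan_eq ans label l]
    have hB : pvStepB (ans.map pvNormB) (label, tp) l
        = ((pvScanB (pvNormA l) (ans.map pvNormB) label).1,
           tp + (if (pvScanB (pvNormA l) (ans.map pvNormB) label).2 then 1 else 0)) := by
      simp only [pvStepB]
      rw [show pvNormB l = pvNormA l from rfl]
    rw [hA, hB]
    set r := pvScanB (pvNormA l) (ans.map pvNormB) label with hr
    obtain ⟨ih1, ih2⟩ := ih r.1 (tp + (if r.2 then 1 else 0)) (fp + (if r.2 then 0 else 1))
    constructor
    · rw [ih1]
      refine congrArg₂ Prod.mk rfl (congrArg₂ Prod.mk rfl ?_)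
      push_cast
      split_ifs <;> omega
    · rw [ih2, pvScanB_sum (pvNormA l) (ans.map pvNormB) label, ← hr]
      split_ifs <;> omega

-- ===== VERDICT (by name: the statement is the Claim_ definition above) =====
theorem gauge_localizer_spec : Claim_equal_gauge_localizer := by
  intro ans res _
  unfold Spec_gauge_localizer
  cases ans with
  | nil => rfl
  | cons a as =>
    simp only [gauge_localizer, gauge_localizer_alt]
    rw [if_neg (by simp : ¬(((a :: as).length == 0) = true))]
    obtain ⟨h1, h2⟩ := gauge_fold (a :: as) res (List.replicate (a :: as).length false) 0 0
    rw [h1]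
    set q := res.foldl (pvStepB ((a :: as).map pvNormB)) (List.replicate (a :: as).length false, 0) with hq
    have hsum : ((q.1.map (fun b => if b then (1 : Int) else 0)).sum) = q.2 := by
      have : pvSumI q.1 = q.2 := by
        rw [h2, pvSumI_replicate]
        ring
      exact this
    rw [hsum]
    refine congrArg₂ List.cons rfl (congrArg₂ List.cons (by ring) (congrArg₂ List.cons rfl rfl))
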